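-- pv_equiv track=rewrite | github.com/liujiayuanjie/efhgn-kt | dyg-baseline/tgn/ctdgraph.py | generate_neighbor_data
-- ===== SOURCE A (Python) =====
-- def generate_neighbor_data(node_num, edges):
--     neighbor_data = [[] for n in range(node_num)]
--
--     for n1, n2, r, t in edges:
--         neighbor_data[n1].append([n2, r, t])
--         neighbor_data[n2].append([n1, r, t])
--
--     for n in range(node_num):
--         data = sorted(neighbor_data[n], key = lambda item: item[-1])
--         neighbor_data[n] = [[n, r, t, i] for i, (n, r, t) in enumerate(data)]
--
--     return neighbor_data
-- ===== SOURCE B (Python) =====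
-- def generate_neighbor_data(node_num, edges):
--     # One global stable sort by timestamp instead of one sort per node:
--     # appending both directions in sorted-edge order yields each node's list
--     # already time-ordered, with the sequential index taken from its length.
--     neighbor_data = [[] for _ in range(node_num)]
--
--     for n1, n2, r, t in sorted(edges, key=lambda e: e[3]):
--         neighbor_data[n1].append([n2, r, t, len(neighbor_data[n1])])
--         neighbor_data[n2].append([n1, r, t, len(neighbor_data[n2])])
--
--     return neighbor_data
-- ===== Notes on version B (the rewrite author's own statement) =====
-- stated objective: faster
-- what changed: Instead of collecting per-node lists and then stably sorting each node's list and enumerating it in a second pass, B stably sorts the whole edge list by timestamp once and appends both directions in that order, so each node's list is built already time-ordered with its sequential index taken from the list's current length.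
import Mathlib
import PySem

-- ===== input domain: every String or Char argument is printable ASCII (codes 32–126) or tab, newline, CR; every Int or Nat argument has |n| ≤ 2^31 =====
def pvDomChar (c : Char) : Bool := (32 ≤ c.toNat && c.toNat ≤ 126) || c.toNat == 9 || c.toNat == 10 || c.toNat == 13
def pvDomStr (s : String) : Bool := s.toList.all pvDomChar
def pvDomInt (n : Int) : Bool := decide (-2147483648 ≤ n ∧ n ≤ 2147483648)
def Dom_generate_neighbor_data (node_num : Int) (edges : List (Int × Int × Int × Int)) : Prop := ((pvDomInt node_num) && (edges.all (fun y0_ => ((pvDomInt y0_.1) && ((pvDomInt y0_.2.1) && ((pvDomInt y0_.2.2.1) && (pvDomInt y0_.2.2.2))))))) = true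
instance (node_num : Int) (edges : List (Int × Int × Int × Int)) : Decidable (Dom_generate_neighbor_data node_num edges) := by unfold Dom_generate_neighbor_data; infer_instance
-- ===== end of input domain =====

-- B replaces A's per-node stable sorts + enumerate by ONE global stable sort of the
-- edge list by timestamp, appending both directions in that order with the index taken
-- from the list's current length (objective: faster — one sort and one pass replace the per-node sort + enumerate passes).

-- ===== PORT A =====
-- Python's 'xs[i]... in-place update' with negative-index wrap (i in range by Pre_)
def pvModifyAt {α : Type} (xs : List α) (i : Int) (f : α → α) : List α :=
  xs.modify ((if i < 0 then i + xs.length else i).toNat) f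

-- key = lambda item: item[-1]  (items here are the non-empty lists [n, r, t])
def pvKeyLast (item : List Int) : Int := (PySem.List.pyGet? item (-1)).getD 0

def generate_neighbor_data (node_num : Int) (edges : List (Int × Int × Int × Int)) : List (List (List Int)) :=
  -- neighbor_data = [[] for n in range(node_num)]
  let nd0 : List (List (List Int)) := (PySem.List.pyRange 0 node_num 1).map (fun _ => [])
  -- for n1, n2, r, t in edges: two appends
  let nd := edges.foldl (fun nd e =>
    pvModifyAt (pvModifyAt nd e.1 (fun l => l ++ [[e.2.1, e.2.2.1, e.2.2.2]]))
      e.2.1 (fun l => l ++ [[e.1, e.2.2.1, e.2.2.2]])) nd0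
  -- the second loop rewrites each slot n from that slot's own previous value only: a map over the slots
  nd.map (fun l =>
    let data := PySem.List.sorted l pvKeyLast false
    (PySem.List.enumerate data 0).map (fun q =>
      match q.2 with
      | [a, b, c] => [a, b, c, q.1]   -- unpacking 'n, r, t = item'; every item has length 3
      | _ => []))

-- ===== PORT B =====
def generate_neighbor_data_alt (node_num : Int) (edges : List (Int × Int × Int × Int)) : List (List (List Int)) :=
  let nd0 : List (List (List Int)) := (PySem.List.pyRange 0 node_num 1).map (fun _ => [])
  -- for n1, n2, r, t in sorted(edges, key=lambda e: e[3]): two appends carrying len(...)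
  (PySem.List.sorted edges (fun e => e.2.2.2) false).foldl (fun nd e =>
    pvModifyAt (pvModifyAt nd e.1 (fun l => l ++ [[e.2.1, e.2.2.1, e.2.2.2, (l.length : Int)]]))
      e.2.1 (fun l => l ++ [[e.1, e.2.2.1, e.2.2.2, (l.length : Int)]])) nd0

-- ===== PRECONDITION & SPEC =====
-- Pre_ excludes exactly the inputs where A raises IndexError: an edge endpoint outside
-- Python's indexable range [-node_num, node_num) of the per-node list.
def Pre_generate_neighbor_data (node_num : Int) (edges : List (Int × Int × Int × Int)) : Prop :=
  ∀ e ∈ edges, -node_num ≤ e.1 ∧ e.1 < node_num ∧ -node_num ≤ e.2.1 ∧ e.2.1 < node_num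
instance (node_num : Int) (edges : List (Int × Int × Int × Int)) : Decidable (Pre_generate_neighbor_data node_num edges) := by unfold Pre_generate_neighbor_data; infer_instance

def pvWitness_generate_neighbor_data : Int × (List (Int × Int × Int × Int)) :=
  (3, [(0, 1, 5, 10), (2, 0, 7, 3), (-1, 1, 2, 3)])

def Spec_generate_neighbor_data (node_num : Int) (edges : List (Int × Int × Int × Int)) (out : List (List (List Int))) : Prop := out = generate_neighbor_data_alt node_num edges
instance (node_num : Int) (edges : List (Int × Int × Int × Int)) (out : List (List (List Int))) : Decidable (Spec_generate_neighbor_data node_num edges out) := by unfold Spec_generate_neighbor_data; infer_instance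

-- ===== CLAIM (what is proved, stated in full; the proofs are below) =====
def Claim_equal_generate_neighbor_data : Prop := ∀ (node_num : Int) (edges : List (Int × Int × Int × Int)), Dom_generate_neighbor_data node_num edges → Pre_generate_neighbor_data node_num edges → Spec_generate_neighbor_data node_num edges (generate_neighbor_data node_num edges)

-- ===== LEMMAS AND PROOFS =====

-- wrapped index, entries an edge contributes to slot j, and index-tagging
def pvW (N : Nat) (i : Int) : Nat := (if i < 0 then i + N else i).toNat

def pvEnt (N j : Nat) (e : Int × Int × Int × Int) : List (List Int) :=
  (if pvW N e.1 = j then [[e.2.1, e.2.2.1, e.2.2.2]] else []) ++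
  (if pvW N e.2.1 = j then [[e.1, e.2.2.1, e.2.2.2]] else [])

def pvTag : Int → List (List Int) → List (List Int)
  | _, [] => []
  | s, x :: xs => (x ++ [s]) :: pvTag (s + 1) xs

theorem pvTag_append (s : Int) (l1 l2 : List (List Int)) :
    pvTag s (l1 ++ l2) = pvTag s l1 ++ pvTag (s + l1.length) l2 := by
  induction l1 generalizing s with
  | nil => simp [pvTag]
  | cons x l1 ih =>
    simp only [List.cons_append, pvTag, ih, List.length_cons]
    congr 2
    push_cast
    ring_nf

theorem pvModifyAt_length {α : Type} (xs : List α) (i : Int) (f : α → α) :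
    (pvModifyAt xs i f).length = xs.length := by
  simp [pvModifyAt]

theorem pvModifyAt_getElem? {α : Type} (xs : List α) (i : Int) (f : α → α) (j : Nat) :
    (pvModifyAt xs i f)[j]? = if pvW xs.length i = j then xs[j]?.map f else xs[j]? := by
  simp only [pvModifyAt, pvW, List.getElem?_modify]
  cases xs[j]? <;> split <;> simp <;> split <;> simp

-- slot contents after A's first loop
theorem pvFoldA (es : List (Int × Int × Int × Int)) (nd : List (List (List Int))) (j : Nat) :
    ((es.foldl (fun nd e =>
        pvModifyAt (pvModifyAt nd e.1 (fun l => l ++ [[e.2.1, e.2.2.1, e.2.2.2]]))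
          e.2.1 (fun l => l ++ [[e.1, e.2.2.1, e.2.2.2]])) nd))[j]?
      = nd[j]?.map (fun l => l ++ es.flatMap (pvEnt nd.length j)) := by
  induction es generalizing nd with
  | nil => cases h : nd[j]? <;> simp [h]
  | cons e es ih =>
    simp only [List.foldl_cons]
    rw [ih]
    have hlen : (pvModifyAt (pvModifyAt nd e.1 (fun l => l ++ [[e.2.1, e.2.2.1, e.2.2.2]]))
        e.2.1 (fun l => l ++ [[e.1, e.2.2.1, e.2.2.2]])).length = nd.length := by
      simp [pvModifyAt_length]
    rw [hlen, pvModifyAt_getElem?, pvModifyAt_getElem?, pvModifyAt_length]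
    simp only [List.flatMap_cons, pvEnt]
    cases h : nd[j]? <;>
      split <;> split <;> simp [List.append_assoc]

-- slot contents after B's loop
theorem pvFoldB (es : List (Int × Int × Int × Int)) (nd : List (List (List Int))) (j : Nat) :
    ((es.foldl (fun nd e =>
        pvModifyAt (pvModifyAt nd e.1 (fun l => l ++ [[e.2.1, e.2.2.1, e.2.2.2, (l.length : Int)]]))
          e.2.1 (fun l => l ++ [[e.1, e.2.2.1, e.2.2.2, (l.length : Int)]])) nd))[j]?
      = nd[j]?.map (fun l => l ++ pvTag l.length (es.flatMap (pvEnt nd.length j))) := by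
  induction es generalizing nd with
  | nil => cases h : nd[j]? <;> simp [h, pvTag]
  | cons e es ih =>
    simp only [List.foldl_cons]
    rw [ih]
    have hlen : (pvModifyAt (pvModifyAt nd e.1 (fun l => l ++ [[e.2.1, e.2.2.1, e.2.2.2, (l.length : Int)]]))
        e.2.1 (fun l => l ++ [[e.1, e.2.2.1, e.2.2.2, (l.length : Int)]])).length = nd.length := by
      simp [pvModifyAt_length]
    rw [hlen, pvModifyAt_getElem?, pvModifyAt_getElem?, pvModifyAt_length]
    simp only [List.flatMap_cons, pvEnt]
    cases h : nd[j]? <;> split <;> split <;>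
      simp [pvTag_append, pvTag, List.append_assoc] <;> push_cast <;> ring_nf

-- insertBy equations and the stability of PySem's insertion sort
theorem pvIns_cons {α : Type} (bf : α → α → Bool) (x y : α) (ys : List α) :
    PySem.List.insertBy bf x (y :: ys) =
      if bf x y then x :: y :: ys else y :: PySem.List.insertBy bf x ys := by
  simp [PySem.List.insertBy]

theorem pvIns_pairwise {α : Type} (key : α → Int) (x : α) (ys : List α)
    (h : ys.Pairwise (fun a b => key a ≤ key b)) :
    (PySem.List.insertBy (fun a b => decide (key a < key b)) x ys).Pairwise
      (fun a b => key a ≤ key b) := by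
  induction ys with
  | nil => simp [PySem.List.insertBy]
  | cons y ys ih =>
    rw [pvIns_cons]
    rcases List.pairwise_cons.1 h with ⟨hy, ht⟩
    split
    · rename_i hlt
      simp only [decide_eq_true_eq] at hlt
      refine List.pairwise_cons.2 ⟨?_, h⟩
      intro z hz
      rcases List.mem_cons.1 hz with rfl | hz
      · exact le_of_lt hlt
      · exact le_trans (le_of_lt hlt) (hy z hz)
    · rename_i hnlt
      simp only [decide_eq_true_eq, not_lt] at hnlt
      refine List.pairwise_cons.2 ⟨?_, ih ht⟩
      intro z hz
      rcases (PySem.List.mem_insertBy _ _ _ _).1 hz with rfl | hz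
      · exact hnlt
      · exact hy z hz

theorem pvIns_filter {α : Type} (key : α → Int) (c : Int) (x : α) (ys : List α)
    (h : ys.Pairwise (fun a b => key a ≤ key b)) :
    (PySem.List.insertBy (fun a b => decide (key a < key b)) x ys).filter
        (fun y => key y == c)
      = if key x == c then ys.filter (fun y => key y == c) ++ [x]
        else ys.filter (fun y => key y == c) := by
  induction ys with
  | nil => by_cases hc : key x = c <;> simp [PySem.List.insertBy, hc]
  | cons y ys ih =>
    rcases List.pairwise_cons.1 h with ⟨hy, ht⟩
    rw [pvIns_cons]
    split
    · rename_i hlt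
      simp only [decide_eq_true_eq] at hlt
      by_cases hc : key x = c
      · have hnil : (y :: ys).filter (fun y => key y == c) = [] := by
          apply List.filter_eq_nil_iff.2
          intro z hz
          have hyz : key y ≤ key z := by
            rcases List.mem_cons.1 hz with rfl | hz
            · exact le_refl _
            · exact hy z hz
          have : c < key z := lt_of_lt_of_le (hc ▸ hlt) hyz
          simp only [beq_iff_eq]
          omega
        rw [List.filter_cons_of_pos (by simp [hc])]
        simp [hc, hnil]
      · rw [List.filter_cons_of_neg (by simp [hc])]
        simp [hc]
    · rename_i hnlt
      by_cases hyc : key y = c <;> by_cases hc : key x = c <;>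
        simp [hyc, hc, ih ht]

theorem pvSorted_filter_foldl {α : Type} (key : α → Int) (c : Int) :
    ∀ (xs acc : List α), acc.Pairwise (fun a b => key a ≤ key b) →
      (xs.foldl (fun acc x => PySem.List.insertBy (fun a b => decide (key a < key b)) x acc)
          acc).filter (fun y => key y == c)
        = acc.filter (fun y => key y == c) ++ xs.filter (fun y => key y == c) := by
  intro xs
  induction xs with
  | nil => intro acc _; simp
  | cons x xs ih =>
    intro acc hacc
    simp only [List.foldl_cons]
    rw [ih _ (pvIns_pairwise key x acc hacc), pvIns_filter key c x acc hacc]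
    by_cases hc : key x = c <;> simp [List.filter_cons, hc]

-- stability: filtering at any key value commutes with PySem.List.sorted
theorem pvSorted_filter {α : Type} (key : α → Int) (c : Int) (xs : List α) :
    (PySem.List.sorted xs key false).filter (fun y => key y == c)
      = xs.filter (fun y => key y == c) := by
  rw [PySem.List.sorted_eq_foldl_insertBy]
  simpa using pvSorted_filter_foldl key c xs [] List.Pairwise.nil

-- a key-sorted list is determined by its filters at each key value
theorem pvStable_unique {α : Type} (key : α → Int) :
    ∀ (l1 l2 : List α), l1.Pairwise (fun a b => key a ≤ key b) →
      l2.Pairwise (fun a b => key a ≤ key b) →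
      (∀ c, l1.filter (fun y => key y == c) = l2.filter (fun y => key y == c)) →
      l1 = l2 := by
  intro l1
  induction l1 with
  | nil =>
    intro l2 _ _ hf
    cases l2 with
    | nil => rfl
    | cons b t2 =>
      have := hf (key b)
      simp [List.filter_cons] at this
  | cons a t1 ih =>
    intro l2 h1 h2 hf
    cases l2 with
    | nil =>
      have := hf (key a)
      simp [List.filter_cons] at this
    | cons b t2 =>
      rcases List.pairwise_cons.1 h1 with ⟨ha, ht1⟩
      rcases List.pairwise_cons.1 h2 with ⟨hb, ht2⟩
      -- key a = key b
      have hab : key a = key b := by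
        have h1' := hf (key a)
        have h2' := hf (key b)
        have hmem_a : a ∈ (b :: t2).filter (fun y => key y == key a) := by
          rw [← h1']
          simp [List.filter_cons]
        have hmem_b : b ∈ (a :: t1).filter (fun y => key y == key b) := by
          rw [h2']
          simp
        have h1m : a ∈ b :: t2 := (List.mem_filter.1 hmem_a).1
        have h2m : b ∈ a :: t1 := (List.mem_filter.1 hmem_b).1
        rcases List.mem_cons.1 h1m with rfl | h1m
        · rfl
        · rcases List.mem_cons.1 h2m with h | h2m
          · rw [h]
          · exact le_antisymm (ha b h2m) (hb a h1m)
      have hfa := hf (key a)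
      rw [List.filter_cons_of_pos (by simp), List.filter_cons_of_pos (by simp [hab])] at hfa
      have hhead : a = b := (List.cons.injEq _ _ _ _ ▸ hfa).1
      subst hhead
      have htails : ∀ c, t1.filter (fun y => key y == c) = t2.filter (fun y => key y == c) := by
        intro c
        by_cases hc : key a = c
        · have := hf c
          rw [List.filter_cons_of_pos (by simp [hc]), List.filter_cons_of_pos (by simp [hc])] at this
          exact (List.cons.injEq _ _ _ _ ▸ this).2
        · have := hf c
          rwa [List.filter_cons_of_neg (by simp [hc]), List.filter_cons_of_neg (by simp [hc])] at this
      rw [ih t2 ht1 ht2 htails]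

theorem pvFlatMap_if {α β : Type} (q : α → Bool) (f : α → List β) (es : List α) :
    es.flatMap (fun e => if q e then f e else []) = (es.filter q).flatMap f := by
  induction es with
  | nil => rfl
  | cons e es ih => by_cases h : q e <;> simp [h, ih]

-- the heart of the equivalence: a stable sort of the per-node entries equals the
-- per-node entries of the stably sorted edge list (entry keys copy the edge key)
theorem pvSorted_flatMap_comm {α β : Type} (k3 : β → Int) (k4 : α → Int) (f : α → List β)
    (hk : ∀ e, ∀ x ∈ f e, k3 x = k4 e) (es : List α) :
    PySem.List.sorted (es.flatMap f) k3 false = (PySem.List.sorted es k4 false).flatMap f := by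
  apply pvStable_unique k3
  · exact PySem.List.sorted_pairwise _ _
  · rw [List.flatMap_def, List.pairwise_flatten]
    constructor
    · intro l hl
      rcases List.mem_map.1 hl with ⟨e, _, rfl⟩
      apply List.pairwise_of_forall_mem_list
      intro x hx y hy
      rw [hk e x hx, hk e y hy]
    · apply List.Pairwise.map
      · intro e1 e2 h12 x hx y hy
        rw [hk e1 x hx, hk e2 y hy]; exact h12
      · exact PySem.List.sorted_pairwise _ _
  · intro c
    have hblock : ∀ e : α, (f e).filter (fun y => k3 y == c)
        = if k4 e == c then f e else [] := by
      intro e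
      by_cases hc : k4 e = c
      · rw [if_pos (by simp [hc])]
        apply List.filter_eq_self.2
        intro x hx
        simp [hk e x hx, hc]
      · rw [if_neg (by simp [hc])]
        apply List.filter_eq_nil_iff.2
        intro x hx
        simp [hk e x hx, hc]
    rw [pvSorted_filter, List.filter_flatMap, List.filter_flatMap]
    simp only [hblock]
    rw [pvFlatMap_if, pvFlatMap_if, pvSorted_filter]

theorem pvEnt_shape {N j : Nat} {e : Int × Int × Int × Int} {x : List Int}
    (hx : x ∈ pvEnt N j e) : ∃ a, x = [a, e.2.2.1, e.2.2.2] := by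
  rcases List.mem_append.1 hx with h | h <;> split at h <;> simp_all

theorem pvKeyLast_triple (a b c : Int) : pvKeyLast [a, b, c] = c := by
  simp [pvKeyLast, PySem.List.pyGet?, PySem.List.pyIdx?]

-- A's enumerate-comprehension is pvTag on lists of 3-element items
theorem pvEnumMap_eq_tag (data : List (List Int)) (s : Int)
    (h : ∀ x ∈ data, ∃ a b c, x = [a, b, c]) :
    (PySem.List.enumerate data s).map (fun q =>
        match q.2 with
        | [a, b, c] => [a, b, c, q.1]
        | _ => []) = pvTag s data := by
  induction data generalizing s with
  | nil => simp [PySem.List.enumerate_nil, pvTag]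
  | cons x xs ih =>
    rcases h x (List.mem_cons_self) with ⟨a, b, c, rfl⟩
    rw [PySem.List.enumerate_cons]
    simp only [List.map_cons, pvTag]
    rw [ih _ (fun y hy => h y (List.mem_cons_of_mem _ hy))]
    rfl

-- ===== VERDICT (by name: the statement is the Claim_ definition above) =====
theorem generate_neighbor_data_spec : Claim_equal_generate_neighbor_data := by
  intro node_num edges _ _
  unfold Spec_generate_neighbor_data generate_neighbor_data generate_neighbor_data_alt
  simp only []
  apply List.ext_getElem?
  intro j
  rw [List.getElem?_map, pvFoldA, pvFoldB]
  rw [List.getElem?_map]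
  cases h : (PySem.List.pyRange 0 node_num 1)[j]? with
  | none => simp
  | some v =>
    simp only [Option.map_some, List.nil_append, List.length_nil, Nat.cast_zero]
    congr 1
    have hshape : ∀ x ∈ PySem.List.sorted
        (edges.flatMap (pvEnt ((PySem.List.pyRange 0 node_num 1).map
          (fun _ => ([] : List (List Int)))).length j)) pvKeyLast false,
        ∃ a b c, x = [a, b, c] := by
      intro x hx
      rw [PySem.List.mem_sorted] at hx
      rcases List.mem_flatMap.1 hx with ⟨e, _, hxe⟩
      rcases pvEnt_shape hxe with ⟨a, rfl⟩
      exact ⟨a, _, _, rfl⟩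
    rw [pvEnumMap_eq_tag _ _ hshape]
    congr 1
    apply pvSorted_flatMap_comm
    intro e x hx
    rcases pvEnt_shape hx with ⟨a, rfl⟩
    exact pvKeyLast_triple a _ _
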